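-- pv_equiv track=rewrite | github.com/markopuza/advent-of-code-2023 | day13/part1.py | get_vertical_reflection_points
-- ===== SOURCE A (Python) =====
-- def get_vertical_reflection_points(row: str) -> list[int]:
--     reflection_points = []
--     lrow = list(row)
--     for i in range(1, len(row)):
--         left = ''.join(lrow[:i][::-1])
--         right = ''.join(lrow[i:])
--         l = min(len(left), len(right))
--         if left[:l] == right[:l]:
--             reflection_points.append(i)
--     return reflection_points
-- ===== SOURCE B (Python) =====
-- def get_vertical_reflection_points(row: str) -> list[int]:
--     # Two-pointer expansion around each gap, char-by-char with early exit,
--     # instead of building reversed/joined substrings and comparing slices.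
--     n = len(row)
--     res = []
--     for i in range(1, n):
--         l = i if i < n - i else n - i
--         k = 0
--         while k < l and row[i - 1 - k] == row[i + k]:
--             k += 1
--         if k == l:
--             res.append(i)
--     return res
-- ===== Notes on version B (the rewrite author's own statement) =====
-- stated objective: alternative
-- what changed: B replaces A's per-split building of a reversed left string and a right string plus slice comparison with an in-place two-pointer character expansion around each gap that stops at the first mismatch, allocating nothing.
import Mathlib
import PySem

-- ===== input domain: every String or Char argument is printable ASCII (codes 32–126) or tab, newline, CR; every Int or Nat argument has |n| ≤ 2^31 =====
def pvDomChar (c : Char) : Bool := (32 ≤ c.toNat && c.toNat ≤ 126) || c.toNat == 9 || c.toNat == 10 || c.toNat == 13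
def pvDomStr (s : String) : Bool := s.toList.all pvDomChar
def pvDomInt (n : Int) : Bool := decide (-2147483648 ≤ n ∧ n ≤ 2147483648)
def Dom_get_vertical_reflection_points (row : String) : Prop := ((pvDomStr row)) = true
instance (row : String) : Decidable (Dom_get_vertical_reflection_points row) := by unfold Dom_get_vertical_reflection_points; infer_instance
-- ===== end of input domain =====

-- B replaces A's reversed/joined substring construction and slice comparison per split
-- with an in-place two-pointer character expansion around each gap (alternative, no speed claim).


-- ===== PORT A =====
def get_vertical_reflection_points (row : String) : List Int :=
  let lrow := row.toList
  (PySem.List.pyRange 1 (PySem.Str.len row) 1).foldl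
    (fun acc i =>
      let left := (PySem.List.slice? (PySem.List.slice lrow none (some i)) none none (-1)).getD []
      let right := PySem.List.slice lrow (some i) none
      let l := min left.length right.length
      if PySem.List.slice left none (some (l : Int)) = PySem.List.slice right none (some (l : Int))
        then acc ++ [i] else acc) []

-- ===== PORT B =====
-- the 'while k < l and row[i-1-k] == row[i+k]: k += 1' loop of Source B
def pvExpand (s : List Char) (i l k : Int) : Int :=
  if h : k < l ∧ PySem.List.pyGetD s (i - 1 - k) ' ' = PySem.List.pyGetD s (i + k) ' ' then
    pvExpand s i l (k + 1)
  else k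
termination_by (l - k).toNat
decreasing_by obtain ⟨h1, -⟩ := h; omega

def get_vertical_reflection_points_alt (row : String) : List Int :=
  let s := row.toList
  let n := PySem.Str.len row
  (PySem.List.pyRange 1 n 1).foldl
    (fun res i =>
      let l := if i < n - i then i else n - i
      if pvExpand s i l 0 = l then res ++ [i] else res) []

-- ===== PRECONDITION & SPEC =====
def Spec_get_vertical_reflection_points (row : String) (out : List Int) : Prop := out = get_vertical_reflection_points_alt row
instance (row : String) (out : List Int) : Decidable (Spec_get_vertical_reflection_points row out) := by unfold Spec_get_vertical_reflection_points; infer_instance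

-- ===== CLAIM (what is proved, stated in full; the proofs are below) =====
def Claim_equal_get_vertical_reflection_points : Prop := ∀ (row : String), Dom_get_vertical_reflection_points row → Spec_get_vertical_reflection_points row (get_vertical_reflection_points row)

-- ===== LEMMAS AND PROOFS =====

-- pvExpand reaches l iff every pair of mirrored characters from offset k up to l matches
theorem pvExpand_eq_iff (s : List Char) (i l : Int) (k : Int) (hk : k ≤ l) :
    pvExpand s i l k = l ↔
      ∀ j : Int, k ≤ j → j < l →
        PySem.List.pyGetD s (i - 1 - j) ' ' = PySem.List.pyGetD s (i + j) ' ' := by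
  by_cases hkl : k < l
  · rw [pvExpand]
    by_cases hc : PySem.List.pyGetD s (i - 1 - k) ' ' = PySem.List.pyGetD s (i + k) ' '
    · rw [dif_pos ⟨hkl, hc⟩, pvExpand_eq_iff s i l (k + 1) (by omega)]
      constructor
      · intro h j hj1 hj2
        rcases eq_or_lt_of_le hj1 with rfl | hlt
        · exact hc
        · exact h j (by omega) hj2
      · intro h j hj1 hj2; exact h j (by omega) hj2
    · rw [dif_neg (by intro h; exact hc h.2)]
      constructor
      · intro h; omega
      · intro h; exact absurd (h k le_rfl hkl) hc
  · have hkeq : k = l := le_antisymm hk (by omega)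
    subst hkeq
    rw [pvExpand, dif_neg (by intro h; omega)]
    constructor
    · intro _ j hj1 hj2; omega
    · intro _; rfl
termination_by (l - k).toNat
decreasing_by omega

-- A's slice comparison at split i says the mirrored characters match pointwise
theorem condA_iff (s : List Char) (I : Nat) (h1 : 1 ≤ I) (h2 : I < s.length) :
    ((s.take I).reverse.take (min I (s.length - I)) = (s.drop I).take (min I (s.length - I))) ↔
      ∀ K : Nat, K < min I (s.length - I) → s.getD (I - 1 - K) ' ' = s.getD (I + K) ' ' := by
  set L := min I (s.length - I) with hL
  constructor
  · intro h K hK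
    have := congrArg (fun t => t[K]?) h
    simp only [List.getElem?_take, hK, if_pos] at this
    have hmin : min I s.length = I := by omega
    rw [List.getElem?_reverse (by simp; omega), List.getElem?_drop] at this
    simp only [List.length_take, List.getElem?_take, hmin] at this
    have hx : I - 1 - K < I := by omega
    rw [if_pos hx] at this
    rw [List.getD_eq_getElem?_getD, List.getD_eq_getElem?_getD, this]
  · intro h
    apply List.ext_getElem
    · simp; omega
    · intro K hK1 hK2
      simp only [List.length_take, List.length_reverse, List.length_take] at hK1
      have hKL : K < L := by simp at hK1; omega
      rw [List.getElem_take, List.getElem_take, List.getElem_reverse, List.getElem_drop]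
      simp only [List.length_take, List.getElem_take]
      have hmin : min I s.length = I := by omega
      simp_rw [hmin]
      have hh := h K hKL
      rw [List.getD_eq_getElem s ' ' (by omega), List.getD_eq_getElem s ' ' (by omega)] at hh
      convert hh using 2

theorem step_eq (s : List Char) (i : Int) (hi1 : 1 ≤ i) (hi2 : i < (s.length : Int)) :
    (PySem.List.slice
        (((PySem.List.slice? (PySem.List.slice s none (some i)) none none (-1)).getD []))
        none (some ((min ((PySem.List.slice? (PySem.List.slice s none (some i)) none none (-1)).getD [] |>.length)
                        ((PySem.List.slice s (some i) none).length) : Nat) : Int)) =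
      PySem.List.slice (PySem.List.slice s (some i) none)
        none (some ((min ((PySem.List.slice? (PySem.List.slice s none (some i)) none none (-1)).getD [] |>.length)
                        ((PySem.List.slice s (some i) none).length) : Nat) : Int)))
      ↔ pvExpand s i (if i < (s.length : Int) - i then i else (s.length : Int) - i) 0
          = (if i < (s.length : Int) - i then i else (s.length : Int) - i) := by
  have hIs : i = ((i.toNat : Nat) : Int) := by omega
  set I : Nat := i.toNat with hIdef
  have h1 : 1 ≤ I := by omega
  have h2 : I < s.length := by omega
  have hslice_to : PySem.List.slice s none (some i) = s.take I := by
    rw [hIs, PySem.List.slice_to_natCast]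
  have hslice_from : PySem.List.slice s (some i) none = s.drop I := by
    rw [hIs, PySem.List.slice_from_natCast]
  rw [hslice_to, hslice_from, PySem.List.slice?_none_none_neg_one]
  simp only [Option.getD_some]
  have hlen_left : (s.take I).reverse.length = I := by simp; omega
  have hlen_right : (s.drop I).length = s.length - I := by simp
  rw [hlen_left, hlen_right]
  rw [PySem.List.slice_to_natCast, PySem.List.slice_to_natCast]
  -- right side: the Int min
  have hl : (if i < (s.length : Int) - i then i else (s.length : Int) - i)
      = ((min I (s.length - I) : Nat) : Int) := by
    split_ifs with h <;> push_cast <;> omega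
  rw [hl, condA_iff s I h1 h2]
  set L : Nat := min I (s.length - I) with hLdef
  rw [pvExpand_eq_iff s i ((L : Nat) : Int) 0 (by positivity)]
  constructor
  · intro h j hj1 hj2
    have hj2' : j.toNat < L := by omega
    have e1 : PySem.List.pyGetD s (i - 1 - j) ' ' = s.getD (I - 1 - j.toNat) ' ' := by
      rw [PySem.List.pyGetD_eq_getElem s ' ' (by omega) (by omega),
        List.getD_eq_getElem s ' ' (by omega)]
      congr 1; omega
    have e2 : PySem.List.pyGetD s (i + j) ' ' = s.getD (I + j.toNat) ' ' := by
      rw [PySem.List.pyGetD_eq_getElem s ' ' (by omega) (by omega),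
        List.getD_eq_getElem s ' ' (by omega)]
      congr 1; omega
    rw [e1, e2]
    exact h j.toNat hj2'
  · intro h K hK
    have e1 : PySem.List.pyGetD s (i - 1 - (K : Int)) ' ' = s.getD (I - 1 - K) ' ' := by
      rw [PySem.List.pyGetD_eq_getElem s ' ' (by omega) (by omega),
        List.getD_eq_getElem s ' ' (by omega)]
      congr 1; omega
    have e2 : PySem.List.pyGetD s (i + (K : Int)) ' ' = s.getD (I + K) ' ' := by
      rw [PySem.List.pyGetD_eq_getElem s ' ' (by omega) (by omega),
        List.getD_eq_getElem s ' ' (by omega)]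
      congr 1; omega
    have hh := h (K : Int) (by positivity) (by omega)
    rw [e1, e2] at hh
    exact hh

-- ===== VERDICT (by name: the statement is the Claim_ definition above) =====
theorem get_vertical_reflection_points_spec : Claim_equal_get_vertical_reflection_points := by
  intro row _
  unfold Spec_get_vertical_reflection_points get_vertical_reflection_points get_vertical_reflection_points_alt
  apply PySem.List.foldl_congr_mem
  intro acc i hi
  rw [PySem.List.mem_pyRange_one] at hi
  rw [PySem.Str.len_eq] at hi
  have hs := step_eq row.toList i hi.1 hi.2
  by_cases hcond : pvExpand row.toList i
      (if i < (row.toList.length : Int) - i then i else (row.toList.length : Int) - i) 0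
      = (if i < (row.toList.length : Int) - i then i else (row.toList.length : Int) - i)
  · rw [if_pos (hs.mpr hcond)]
    simp only [PySem.Str.len_eq]
    rw [if_pos hcond]
  · rw [if_neg (fun hA => hcond (hs.mp hA))]
    simp only [PySem.Str.len_eq]
    rw [if_neg hcond]
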